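-- pv_equiv track=rewrite | github.com/NailKalimov/Ya_Contest_1 | less1/task_7.py | calc
-- ===== SOURCE A (Python) =====
-- def calc(total_material, one_blank, one_detail):
--     if total_material < one_blank or one_blank < one_detail or total_material < one_detail:
--         return 0
--     else:
--         number_of_blank = total_material // one_blank
--         number_of_detail_from_blank = one_blank // one_detail
--         remains = total_material % one_blank + \
--             number_of_blank*(one_blank % one_detail)
--         return (
--             number_of_blank * number_of_detail_from_blank
--             + calc(remains, one_blank, one_detail)
--         )
-- ===== SOURCE B (Python) =====
-- def calc(total_material, one_blank, one_detail):
--     if (total_material < one_blank or one_blank < one_detail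
--             or total_material < one_detail):
--         return 0
--     k = one_blank // one_detail          # details per blank
--     r = one_blank % one_detail           # scrap per blank
--     # Each blank cut consumes k*one_detail material net (returns r scrap); the
--     # process ends at the unique leftover ≡ total_material (mod k*one_detail)
--     # lying in [r, one_blank).
--     leftover = (total_material - one_blank) % (k * one_detail) + r
--     return (total_material - leftover) // one_detail
-- ===== Notes on version B (the rewrite author's own statement) =====
-- stated objective: alternative
-- what changed: Replaces the recursion entirely by a closed-form formula: each blank nets k*one_detail material (k = one_blank//one_detail), so the process terminates at the unique leftover congruent to total_material modulo k*one_detail lying in [one_blank%one_detail, one_blank), and the count is (total_material - leftover)//one_detail.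
-- outside the precondition, e.g. on calc(7, 1, -2): A returns -7, B returns -4; on calc(3, 2, 0): A raises ZeroDivisionError, B raises ZeroDivisionError; on calc(-1, -1, -2): A raises RecursionError, B raises ZeroDivisionError
import Mathlib
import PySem

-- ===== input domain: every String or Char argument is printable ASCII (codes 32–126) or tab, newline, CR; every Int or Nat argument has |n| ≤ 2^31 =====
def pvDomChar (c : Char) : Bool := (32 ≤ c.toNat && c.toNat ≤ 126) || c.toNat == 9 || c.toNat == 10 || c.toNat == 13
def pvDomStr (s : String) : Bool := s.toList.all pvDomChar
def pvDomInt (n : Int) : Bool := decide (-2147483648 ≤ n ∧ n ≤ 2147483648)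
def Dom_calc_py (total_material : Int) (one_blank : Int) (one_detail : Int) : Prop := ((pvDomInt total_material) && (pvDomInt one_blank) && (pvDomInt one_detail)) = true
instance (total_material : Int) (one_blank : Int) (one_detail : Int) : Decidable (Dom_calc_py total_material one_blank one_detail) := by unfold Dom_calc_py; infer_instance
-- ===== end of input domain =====

-- B replaces A's recursion by a closed-form formula for the final leftover; return-value equivalence on Pre_.

-- ===== PORT A =====
-- A's port uses a fuel bound total_material.toNat + 1, sufficient on Pre_ (the total shrinks by ≥ 1 each call).
def pvCalcRecA (fuel : Nat) (total_material one_blank one_detail : Int) : Int :=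
  match fuel with
  | 0 => 0  -- fuel guard only; never reached on Pre_
  | f + 1 =>
    if total_material < one_blank ∨ one_blank < one_detail ∨ total_material < one_detail then 0
    else
      let number_of_blank := PySem.Int.floordiv total_material one_blank
      let number_of_detail_from_blank := PySem.Int.floordiv one_blank one_detail
      let remains := PySem.Int.mod total_material one_blank +
        number_of_blank * PySem.Int.mod one_blank one_detail
      number_of_blank * number_of_detail_from_blank + pvCalcRecA f remains one_blank one_detail

def calc_py (total_material : Int) (one_blank : Int) (one_detail : Int) : Int :=
  pvCalcRecA (total_material.toNat + 1) total_material one_blank one_detail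

-- ===== PORT B =====
def calc_py_alt (total_material : Int) (one_blank : Int) (one_detail : Int) : Int :=
  if total_material < one_blank ∨ one_blank < one_detail ∨ total_material < one_detail then 0
  else
    let k := PySem.Int.floordiv one_blank one_detail
    let r := PySem.Int.mod one_blank one_detail
    let leftover := PySem.Int.mod (total_material - one_blank) (k * one_detail) + r
    PySem.Int.floordiv (total_material - leftover) one_detail

-- ===== PRECONDITION & SPEC =====
-- Pre_ excludes one_detail ≤ 0 with the cutting guard satisfied: the natural domain is a positive
-- detail size — there A divides by zero or recurses without bound on most such inputs, and on the
-- rest returns a meaningless negative count from a nonpositive divisor.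
def Pre_calc_py (total_material : Int) (one_blank : Int) (one_detail : Int) : Prop :=
  1 ≤ one_detail ∨ total_material < one_blank ∨ one_blank < one_detail ∨ total_material < one_detail
instance (total_material : Int) (one_blank : Int) (one_detail : Int) : Decidable (Pre_calc_py total_material one_blank one_detail) := by unfold Pre_calc_py; infer_instance
def pvWitness_calc_py : Int × Int × Int := (10, 4, 2)

def Spec_calc_py (total_material : Int) (one_blank : Int) (one_detail : Int) (out : Int) : Prop := out = calc_py_alt total_material one_blank one_detail
instance (total_material : Int) (one_blank : Int) (one_detail : Int) (out : Int) : Decidable (Spec_calc_py total_material one_blank one_detail out) := by unfold Spec_calc_py; infer_instance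

-- ===== CLAIM (what is proved, stated in full; the proofs are below) =====
def Claim_equal_calc_py : Prop := ∀ (total_material : Int) (one_blank : Int) (one_detail : Int), Dom_calc_py total_material one_blank one_detail → Pre_calc_py total_material one_blank one_detail → Spec_calc_py total_material one_blank one_detail (calc_py total_material one_blank one_detail)

-- ===== LEMMAS AND PROOFS =====
-- Main invariant: with 1 ≤ d and enough fuel (fuel > t), A's recursion computes B's closed form.
theorem pvCalcRecA_eq_alt (fuel : Nat) (t b d : Int) (hd : 1 ≤ d) (hfuel : t < (fuel : Int)) :
    pvCalcRecA fuel t b d = calc_py_alt t b d := by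
  induction fuel generalizing t with
  | zero =>
    have ht0 : t < 0 := by exact_mod_cast hfuel
    have : t < d := by omega
    simp [pvCalcRecA, calc_py_alt, this]
  | succ f ih =>
    by_cases hg : t < b ∨ b < d ∨ t < d
    · simp [pvCalcRecA, calc_py_alt, hg]
    · push_neg at hg
      obtain ⟨hbt, hdb, hdt⟩ := hg
      have hd0 : (0:Int) < d := hd
      have hb0 : (0:Int) < b := lt_of_lt_of_le hd0 hdb
      set nb := PySem.Int.floordiv t b with hnbdef
      set k := PySem.Int.floordiv b d with hkdef
      set r := PySem.Int.mod b d with hrdef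
      set mtb := PySem.Int.mod t b with hmtbdef
      have hsplit_b : k * d + r = b := PySem.Int.floordiv_mul_add_mod b d
      have hsplit_t : nb * b + mtb = t := PySem.Int.floordiv_mul_add_mod t b
      have hr0 : 0 ≤ r := PySem.Int.mod_nonneg b hd0
      have hrd : r < d := PySem.Int.mod_lt b hd0
      have hmtb0 : 0 ≤ mtb := PySem.Int.mod_nonneg t hb0
      have hmtbb : mtb < b := PySem.Int.mod_lt t hb0
      have hk1 : 1 ≤ k := by
        rw [hkdef, PySem.Int.le_floordiv_iff_mul_le hd0]; omega
      have hnb1 : 1 ≤ nb := by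
        rw [hnbdef, PySem.Int.le_floordiv_iff_mul_le hb0]; omega
      have hkd1 : 1 ≤ k * d := by nlinarith
      -- the next total
      set t' := mtb + nb * r with ht'def
      have ht'eq : t' = t - nb * (k * d) := by
        rw [ht'def]; linear_combination hsplit_t + nb * hsplit_b
      have hnbr : r ≤ nb * r := by nlinarith
      have ht'r : r ≤ t' := by rw [ht'def]; linarith
      have hnbkd : k * d ≤ nb * (k * d) := by nlinarith
      have ht'lt : t' < t := by rw [ht'eq]; linarith
      have ht'fuel : t' < (f : Int) := by push_cast at hfuel; omega
      -- unfold one step of A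
      rw [show pvCalcRecA (f+1) t b d
            = nb * k + pvCalcRecA f t' b d by
            simp only [pvCalcRecA]
            rw [if_neg (by push_neg; exact ⟨hbt, hdb, hdt⟩)]]
      rw [ih t' ht'fuel]
      have hM0 : (0:Int) < k * d := hkd1
      have hdne : d ≠ 0 := ne_of_gt hd0
      have hgt : ¬ (t < b ∨ b < d ∨ t < d) := by push_neg; exact ⟨hbt, hdb, hdt⟩
      by_cases hcase : t' < b
      · -- the recursion stops after this step: the leftover at t is exactly t'
        have haltt' : calc_py_alt t' b d = 0 := by
          simp [calc_py_alt, hcase]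
        have hmod : PySem.Int.mod (t - b) (k * d) = t' - r := by
          rw [PySem.Int.mod_eq_emod_of_pos hM0]
          have hrw : t - b = (t' - r) + (k * d) * (nb - 1) := by
            rw [ht'eq]; linear_combination hsplit_b
          rw [hrw, Int.add_mul_emod_self_left]
          exact Int.emod_eq_of_lt (by linarith) (by linarith)
        rw [haltt', add_zero]
        simp only [calc_py_alt]
        rw [if_neg hgt, ← hkdef, ← hrdef, hmod]
        have h2 : t - (t' - r + r) = nb * k * d := by rw [ht'eq]; ring
        rw [h2, PySem.Int.floordiv_eq_ediv_of_pos hd0, Int.mul_ediv_cancel _ hdne]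
      · -- the recursion continues: t and t' have the same leftover
        have hgt' : ¬ (t' < b ∨ b < d ∨ t' < d) := by push_neg; exact ⟨by omega, hdb, by omega⟩
        have hmodeq : PySem.Int.mod (t - b) (k * d) = PySem.Int.mod (t' - b) (k * d) := by
          rw [PySem.Int.mod_eq_emod_of_pos hM0, PySem.Int.mod_eq_emod_of_pos hM0]
          have hrw : t - b = (t' - b) + (k * d) * nb := by rw [ht'eq]; ring
          rw [hrw, Int.add_mul_emod_self_left]
        simp only [calc_py_alt]
        rw [if_neg hgt', if_neg hgt, ← hkdef, ← hrdef, hmodeq]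
        set L := PySem.Int.mod (t' - b) (k * d) + r with hLdef
        have hrw2 : t - L = (t' - L) + (nb * k) * d := by rw [ht'eq]; ring
        rw [PySem.Int.floordiv_eq_ediv_of_pos hd0, PySem.Int.floordiv_eq_ediv_of_pos hd0,
            hrw2, Int.add_mul_ediv_right _ _ hdne]
        ring

-- ===== VERDICT (by name: the statement is the Claim_ definition above) =====
theorem calc_py_spec : Claim_equal_calc_py := by
  intro t b d _ hpre
  unfold Spec_calc_py calc_py
  by_cases hg : t < b ∨ b < d ∨ t < d
  · simp [pvCalcRecA, calc_py_alt, hg]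
  · have hd : 1 ≤ d := by unfold Pre_calc_py at hpre; tauto
    exact pvCalcRecA_eq_alt _ t b d hd
      (by have := Int.self_le_toNat t; push_cast; omega)
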